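-- pv_equiv track=rewrite | github.com/Alexander-Ageev/Exercises | 28 exercises/22 (TransformTransform)/main.py | s_function
-- ===== SOURCE A (Python) =====
-- def s_function(source_sequence):
--     transform_sequence = []
--     N = len(source_sequence)
--     for i in range(N):
--         for j in range(N - i):
--             k = i + j
--             m = max(source_sequence[j: k + 1])
--             transform_sequence.append(m)
--     return transform_sequence[::-1]
-- ===== SOURCE B (Python) =====
-- def s_function(source_sequence):
--     out = []
--     row = list(source_sequence)
--     out.extend(row)
--     for _ in range(len(source_sequence) - 1):
--         row = [max(a, b) for a, b in zip(row, row[1:])]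
--         out.extend(row)
--     return out[::-1]
-- ===== Notes on version B (the rewrite author's own statement) =====
-- stated objective: faster
-- what changed: Replaces the per-window slice+max (O(N) per window, O(N^3) total) by a dynamic-programming cascade: the row of window maxima for length L+1 is computed from the length-L row by zipping it with its own tail and taking pairwise maxima, so each window costs O(1).
import Mathlib
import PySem

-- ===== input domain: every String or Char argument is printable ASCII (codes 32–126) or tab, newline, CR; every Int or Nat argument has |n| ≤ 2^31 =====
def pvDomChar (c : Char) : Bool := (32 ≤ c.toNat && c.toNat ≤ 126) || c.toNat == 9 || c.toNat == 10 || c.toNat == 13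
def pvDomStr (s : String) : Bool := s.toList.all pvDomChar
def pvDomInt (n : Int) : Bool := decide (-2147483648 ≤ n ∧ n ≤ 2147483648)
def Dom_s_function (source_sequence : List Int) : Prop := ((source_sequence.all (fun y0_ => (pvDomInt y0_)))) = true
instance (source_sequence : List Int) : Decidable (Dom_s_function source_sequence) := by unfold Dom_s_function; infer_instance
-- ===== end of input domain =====

-- B replaces A's per-window slice+max scan by a row-by-row dynamic-programming cascade
-- (the length-(L+1) maxima row is the pairwise max of the length-L row and its tail): faster (O(n^2) vs O(n^3), measured).

-- ===== PORT A =====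
-- literal transliteration of A; the slice source_sequence[j:k+1] is never empty (j ≤ k < N),
-- so Python's max never raises; its port's `.getD 0` default is therefore never taken.
def s_function (source_sequence : List Int) : List Int :=
  let N : Int := PySem.List.len source_sequence
  let transform_sequence :=
    (PySem.List.pyRange 0 N 1).foldl (fun acc i =>
      (PySem.List.pyRange 0 (N - i) 1).foldl (fun acc2 j =>
        let k := i + j
        let m := (PySem.List.max? (PySem.List.slice source_sequence (some j) (some (k + 1)))
                   (fun y => y)).getD 0
        acc2 ++ [m]) acc) []
  -- transform_sequence[::-1]
  (PySem.List.slice? transform_sequence none none (-1)).getD []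

-- ===== PORT B =====
-- literal transliteration of Source B: state (out, row); row := pairwise maxima of zip(row, row[1:]).
def s_function_alt (source_sequence : List Int) : List Int :=
  let st :=
    (PySem.List.pyRange 0 (PySem.List.len source_sequence - 1) 1).foldl
      (fun (st : List Int × List Int) (_ : Int) =>
        let row := (st.2.zip st.2.tail).map (fun p => max p.1 p.2)
        (st.1 ++ row, row))
      (source_sequence, source_sequence)
  st.1.reverse

-- ===== PRECONDITION & SPEC =====
def Spec_s_function (source_sequence : List Int) (out : List Int) : Prop := out = s_function_alt source_sequence
instance (source_sequence : List Int) (out : List Int) : Decidable (Spec_s_function source_sequence out) := by unfold Spec_s_function; infer_instance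

-- ===== CLAIM (what is proved, stated in full; the proofs are below) =====
def Claim_equal_s_function : Prop := ∀ (source_sequence : List Int), Dom_s_function source_sequence → Spec_s_function source_sequence (s_function source_sequence)

-- ===== LEMMAS AND PROOFS =====

-- max of the window src[j .. j+L] (0 on an out-of-range start; never used there)
def wmax (src : List Int) (j L : Nat) : Int :=
  match src.drop j with
  | [] => 0
  | x :: t => (t.take L).foldl max x

-- the row of all window maxima of length L+1
def wrow (src : List Int) (L : Nat) : List Int :=
  (List.range (src.length - L)).map (fun j => wmax src j L)

theorem wmax_zero (src : List Int) (j : Nat) (h : j < src.length) :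
    wmax src j 0 = src.getD j 0 := by
  rw [List.getD_eq_getElem src 0 h]
  simp only [wmax, List.drop_eq_getElem_cons h, List.take_zero, List.foldl_nil]

theorem wmax_cons (src : List Int) (j L : Nat) (h : j + 1 < src.length) :
    wmax src j (L + 1) = max (src.getD j 0) (wmax src (j + 1) L) := by
  have hj : j < src.length := by omega
  rw [List.getD_eq_getElem src 0 hj]
  simp only [wmax, List.drop_eq_getElem_cons hj, List.drop_eq_getElem_cons h,
    List.take_succ_cons]
  exact List.foldl_assoc

theorem wmax_snoc (src : List Int) (j L : Nat) (h : j + L + 1 < src.length) :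
    wmax src j (L + 1) = max (wmax src j L) (src.getD (j + L + 1) 0) := by
  have hj : j < src.length := by omega
  have hidx : j + 1 + L = j + L + 1 := by omega
  have hget : (src.drop (j + 1))[L]? = some (src.getD (j + L + 1) 0) := by
    rw [List.getElem?_drop, hidx, List.getElem?_eq_getElem (by omega),
      List.getD_eq_getElem src 0 h]
  simp only [wmax, List.drop_eq_getElem_cons hj, List.take_add_one, hget,
    Option.toList_some, List.foldl_append, List.foldl_cons, List.foldl_nil]

theorem wmax_succ (src : List Int) (j L : Nat) (h : j + L + 1 < src.length) :
    max (wmax src j L) (wmax src (j + 1) L) = wmax src j (L + 1) := by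
  induction L generalizing j with
  | zero =>
      rw [wmax_cons src j 0 (by omega), wmax_zero src j (by omega)]
  | succ M _ =>
      have h1 : j + 1 < src.length := by omega
      rw [wmax_cons src j M h1, wmax_cons src j (M + 1) h1,
        wmax_snoc src (j + 1) M (by omega), max_assoc,
        ← max_assoc (wmax src (j + 1) M), max_self]

theorem wrow_zero (src : List Int) : wrow src 0 = src := by
  apply List.ext_getElem
  · simp [wrow]
  · intro i h1 h2
    simp only [wrow, Nat.sub_zero] at h1 ⊢
    simp only [List.getElem_map, List.getElem_range]
    rw [wmax_zero src i (by simpa using h2), List.getD_eq_getElem src 0 (by simpa using h2)]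

-- one DP step: pairwise maxima of a row and its tail give the next row
theorem wrow_step (src : List Int) (L : Nat) (h : L < src.length) :
    ((wrow src L).zip (wrow src L).tail).map (fun p => max p.1 p.2) = wrow src (L + 1) := by
  apply List.ext_getElem
  · simp [wrow]
    omega
  · intro i h1 h2
    have hi : i < src.length - (L + 1) := by simpa [wrow] using h2
    have hL : i < (wrow src L).length := by simp [wrow]; omega
    have hT : i < (wrow src L).tail.length := by simp [wrow]; omega
    simp only [List.getElem_map, List.getElem_zip, List.getElem_tail]
    simp only [wrow, List.getElem_map, List.getElem_range]
    exact wmax_succ src i L (by omega)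

-- the B loop invariant: after t iterations the state is (rows 0..t concatenated, row t)
theorem loopB (src : List Int) (t : Nat) (ht : t < src.length) :
    (List.range t).foldl
      (fun (st : List Int × List Int) (_ : Nat) =>
        let row := (st.2.zip st.2.tail).map (fun p => max p.1 p.2)
        (st.1 ++ row, row)) (src, src)
    = ((List.range (t + 1)).flatMap (wrow src), wrow src t) := by
  induction t with
  | zero => simp [wrow_zero]
  | succ t ih =>
      rw [List.range_succ, List.foldl_append, ih (by omega), List.foldl_cons, List.foldl_nil]
      simp only [wrow_step src t (by omega)]
      rw [List.range_succ (n := t + 1), List.flatMap_append]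
      simp

-- closed form of port B
theorem altB (src : List Int) :
    s_function_alt src = ((List.range src.length).flatMap (wrow src)).reverse := by
  rcases src with - | ⟨a, l⟩
  · rfl
  · have hlen : ((PySem.List.len (a :: l) : Int) - 1 - 0).toNat = l.length := by
      simp [PySem.List.len]
    rw [s_function_alt, PySem.List.pyRange_one, List.foldl_map, hlen]
    rw [loopB (a :: l) l.length (by simp)]
    have h2 : l.length + 1 = (a :: l).length := by simp
    rw [h2]

-- the slice max in A is exactly wmax
theorem sliceA (src : List Int) (k j : Nat) (hj : j < src.length) :
    ((PySem.List.max? (PySem.List.slice src (some (j : Int)) (some ((k : Int) + (j : Int) + 1)))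
        (fun y => y)).getD 0) = wmax src j k := by
  have hb : ((k : Int) + (j : Int) + 1) = ((j : Int) + ((k + 1 : Nat) : Int)) := by push_cast; ring
  rw [hb, PySem.List.slice_natCast_add]
  rw [List.drop_eq_getElem_cons hj, List.take_succ_cons, PySem.List.max?_id_cons]
  simp only [Option.getD_some, wmax, List.drop_eq_getElem_cons hj]

-- closed form of port A
set_option maxRecDepth 200000 in
theorem eqA (src : List Int) :
    s_function src = ((List.range src.length).flatMap (wrow src)).reverse := by
  conv_lhs => rw [s_function]
  conv_lhs => simp only [PySem.List.foldl_append_singleton_eq_map]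
  conv_lhs => simp only [PySem.List.foldl_append_eq_flatMap]
  conv_lhs => simp only [PySem.List.slice?_none_none_neg_one, Option.getD_some, List.nil_append]
  congr 1
  rw [PySem.List.pyRange_one, List.flatMap_map]
  have hN : ((PySem.List.len src : Int) - 0).toNat = src.length := by
    simp [PySem.List.len]
  rw [hN]
  apply List.flatMap_congr
  intro k hk
  rw [List.mem_range] at hk
  have h1 : (PySem.List.len src : Int) - (0 + (k : Int)) = ((src.length - k : Nat) : Int) := by
    simp only [PySem.List.len, zero_add]
    omega
  rw [h1, PySem.List.pyRange_one, List.map_map]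
  have hN2 : (((src.length - k : Nat) : Int) - 0).toNat = src.length - k := by omega
  rw [hN2]
  unfold wrow
  apply List.map_congr_left
  intro j hj
  rw [List.mem_range] at hj
  have hj' : j < src.length := by omega
  simpa only [Function.comp_apply, zero_add] using sliceA src k j hj'

-- ===== VERDICT (by name: the statement is the Claim_ definition above) =====
theorem s_function_spec : Claim_equal_s_function := by
  intro src _
  unfold Spec_s_function
  rw [eqA, altB]
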